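-- pv_equiv track=rewrite | github.com/jcraig949jfi/Prometheus | noesis/the_maths/clifford_algebra.py | _blade_product
-- ===== SOURCE A (Python) =====
-- _DEFAULT_P = 3
--
-- _DEFAULT_Q = 0
--
-- def _metric_sign(i, p=_DEFAULT_P, q=_DEFAULT_Q):
--     """Metric signature: generator e_i squares to +1 for i<p, -1 for p<=i<p+q."""
--     if i < p:
--         return 1
--     else:
--         return -1
--
-- def _blade_product(a_idx, b_idx, p=_DEFAULT_P, q=_DEFAULT_Q):
--     """Compute the product of two basis blades.
--     Returns (sign, result_index)."""
--     n = p + q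
--     sign = 1
--     result = a_idx
--
--     for i in range(n):
--         if not (b_idx & (1 << i)):
--             continue
--         # We need to move generator e_i past all generators in result that are > i
--         # Count swaps needed
--         swaps = 0
--         for j in range(i + 1, n):
--             if result & (1 << j):
--                 swaps += 1
--         if swaps % 2 == 1:
--             sign *= -1
--
--         if result & (1 << i):
--             # e_i * e_i = metric sign
--             sign *= _metric_sign(i, p, q)
--             result ^= (1 << i)  # Remove e_i
--         else:
--             result ^= (1 << i)  # Add e_i
--
--     return sign, result
-- ===== SOURCE B (Python) =====
-- _DEFAULT_P = 3
--
-- _DEFAULT_Q = 0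
--
-- def _blade_product(a_idx, b_idx, p=_DEFAULT_P, q=_DEFAULT_Q):
--     """Single descending pass: keep a running count t of generators of a_idx
--     above the current position (the swap count A recomputes with an inner scan),
--     track only the sign's parity, and form the result index with one xor."""
--     n = p + q
--     neg = 0
--     t = 0  # number of set bits of a_idx in positions > i
--     for i in range(n - 1, -1, -1):
--         if (b_idx >> i) & 1:
--             neg ^= t & 1
--             if (a_idx >> i) & 1 and i >= p:
--                 neg ^= 1  # e_i * e_i = -1 in the metric
--         if (a_idx >> i) & 1:
--             t += 1
--     result = a_idx ^ (b_idx & ((1 << n) - 1)) if n > 0 else a_idx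
--     return ((-1 if neg else 1), result)
-- ===== Notes on version B (the rewrite author's own statement) =====
-- stated objective: faster
-- what changed: B replaces A's O(n^2) nested swap-count scan (an inner loop over all higher generators for every bit of b_idx) by a single descending pass that maintains a running count of the set bits of a_idx above the current position (valid because A's earlier toggles only touch lower bits), tracks only the sign's parity, and builds the result index with one xor against a mask instead of bit-by-bit toggles.
import Mathlib
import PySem

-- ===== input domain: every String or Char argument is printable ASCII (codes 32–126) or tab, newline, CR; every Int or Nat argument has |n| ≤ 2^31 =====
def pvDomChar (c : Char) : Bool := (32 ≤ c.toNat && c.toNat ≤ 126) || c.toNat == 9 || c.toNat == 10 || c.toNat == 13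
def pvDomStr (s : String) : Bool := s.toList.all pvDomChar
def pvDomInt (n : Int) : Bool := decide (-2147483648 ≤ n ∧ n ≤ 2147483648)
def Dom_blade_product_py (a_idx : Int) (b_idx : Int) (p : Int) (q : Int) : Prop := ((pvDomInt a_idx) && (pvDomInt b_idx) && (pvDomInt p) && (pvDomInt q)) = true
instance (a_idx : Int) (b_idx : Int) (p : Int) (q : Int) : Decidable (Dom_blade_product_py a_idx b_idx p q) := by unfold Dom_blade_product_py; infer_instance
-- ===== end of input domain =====

-- B replaces A's O(n^2) nested swap-count scan by one descending pass that keeps a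
-- running count of the generators of a_idx above the current position, and forms the
-- result index with a single xor; equivalence of the return values is proved below.

-- ===== PORT A =====
def metric_sign_py (i : Int) (p : Int) (q : Int) : Int :=
  if i < p then 1 else -1

def blade_step (b_idx : Int) (p : Int) (q : Int) (st : Int × Int) (i : Int) : Int × Int :=
  if PySem.Int.band b_idx ((1:Int) <<< i.toNat) = 0 then st
  else
    let swaps : Int :=
      (PySem.List.pyRange (i + 1) (p + q) 1).foldl
        (fun s j => if PySem.Int.band st.2 ((1:Int) <<< j.toNat) ≠ 0 then s + 1 else s) 0
    let sign : Int := if PySem.Int.mod swaps 2 = 1 then st.1 * (-1) else st.1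
    if PySem.Int.band st.2 ((1:Int) <<< i.toNat) ≠ 0 then
      (sign * metric_sign_py i p q, PySem.Int.bxor st.2 ((1:Int) <<< i.toNat))
    else
      (sign, PySem.Int.bxor st.2 ((1:Int) <<< i.toNat))

def blade_product_py (a_idx : Int) (b_idx : Int) (p : Int) (q : Int) : Int × Int :=
  (PySem.List.pyRange 0 (p + q) 1).foldl (blade_step b_idx p q) (1, a_idx)

-- ===== PORT B =====
def blade_step_alt (a_idx : Int) (b_idx : Int) (p : Int) (st : Int × Int) (i : Int) : Int × Int :=
  let neg : Int :=
    if PySem.Int.band (b_idx >>> i.toNat) 1 ≠ 0 then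
      let neg1 := PySem.Int.bxor st.1 (PySem.Int.band st.2 1)
      if PySem.Int.band (a_idx >>> i.toNat) 1 ≠ 0 ∧ p ≤ i then PySem.Int.bxor neg1 1 else neg1
    else st.1
  let t : Int := if PySem.Int.band (a_idx >>> i.toNat) 1 ≠ 0 then st.2 + 1 else st.2
  (neg, t)

def blade_product_py_alt (a_idx : Int) (b_idx : Int) (p : Int) (q : Int) : Int × Int :=
  let n := p + q
  let st := (PySem.List.pyRange (n - 1) (-1) (-1)).foldl (blade_step_alt a_idx b_idx p) (0, 0)
  let result := if 0 < n then PySem.Int.bxor a_idx (PySem.Int.band b_idx ((1:Int) <<< n.toNat - 1)) else a_idx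
  ((if st.1 ≠ 0 then -1 else 1), result)

-- ===== PRECONDITION & SPEC =====
def Spec_blade_product_py (a_idx : Int) (b_idx : Int) (p : Int) (q : Int) (out : Int × Int) : Prop := out = blade_product_py_alt a_idx b_idx p q
instance (a_idx : Int) (b_idx : Int) (p : Int) (q : Int) (out : Int × Int) : Decidable (Spec_blade_product_py a_idx b_idx p q out) := by unfold Spec_blade_product_py; infer_instance

-- ===== CLAIM (what is proved, stated in full; the proofs are below) =====
def Claim_equal_blade_product_py : Prop := ∀ (a_idx : Int) (b_idx : Int) (p : Int) (q : Int), Dom_blade_product_py a_idx b_idx p q → Spec_blade_product_py a_idx b_idx p q (blade_product_py a_idx b_idx p q)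

-- ===== LEMMAS AND PROOFS =====

-- ---- proof-side abbreviations ----
def pvSgn (k : Nat) : Int := if k % 2 = 1 then -1 else 1

def pvCnt (x : Int) : Nat → Nat → Nat
  | _, 0 => 0
  | lo, len+1 => (if x.testBit lo then 1 else 0) + pvCnt x (lo+1) len

def pvMask (m len : Nat) : Nat := (2 ^ len - 1) <<< m

def pvTrm (a b p : Int) (N i : Nat) : Nat :=
  if b.testBit i then
    pvCnt a (i+1) (N - (i+1)) + (if a.testBit i ∧ p ≤ (i:Int) then 1 else 0)
  else 0

def pvSum (a b p : Int) (N : Nat) : Nat → Nat → Nat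
  | _, 0 => 0
  | m, len+1 => pvTrm a b p N m + pvSum a b p N (m+1) len

-- ---- basic bit lemmas ----
theorem pvTestBit_natCast (m j : Nat) : ((m : Int)).testBit j = m.testBit j := rfl

theorem pvTestBit_zero (j : Nat) : (0 : Int).testBit j = false := Nat.zero_testBit j

theorem pvExt {x y : Int} (h : ∀ j, x.testBit j = y.testBit j) : x = y := by
  cases x with
  | ofNat m =>
    cases y with
    | ofNat k => exact congrArg Int.ofNat (Nat.eq_of_testBit_eq fun i => h i)
    | negSucc k =>
      exfalso
      have h2 := h (m + k)
      have hm : m.testBit (m+k) = false :=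
        Nat.testBit_lt_two_pow (lt_of_lt_of_le Nat.lt_two_pow_self
          (Nat.pow_le_pow_right (by norm_num) (Nat.le_add_right _ _)))
      have hk : k.testBit (m+k) = false :=
        Nat.testBit_lt_two_pow (lt_of_lt_of_le Nat.lt_two_pow_self
          (Nat.pow_le_pow_right (by norm_num) (Nat.le_add_left _ _)))
      rw [show (Int.ofNat m).testBit (m+k) = m.testBit (m+k) from rfl,
          show (Int.negSucc k).testBit (m+k) = !k.testBit (m+k) from rfl, hm, hk] at h2
      simp at h2
  | negSucc m =>
    cases y with
    | ofNat k =>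
      exfalso
      have h2 := h (m + k)
      have hm : m.testBit (m+k) = false :=
        Nat.testBit_lt_two_pow (lt_of_lt_of_le Nat.lt_two_pow_self
          (Nat.pow_le_pow_right (by norm_num) (Nat.le_add_right _ _)))
      have hk : k.testBit (m+k) = false :=
        Nat.testBit_lt_two_pow (lt_of_lt_of_le Nat.lt_two_pow_self
          (Nat.pow_le_pow_right (by norm_num) (Nat.le_add_left _ _)))
      rw [show (Int.negSucc m).testBit (m+k) = !m.testBit (m+k) from rfl,
          show (Int.ofNat k).testBit (m+k) = k.testBit (m+k) from rfl, hm, hk] at h2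
      simp at h2
    | negSucc k =>
      have : m = k := Nat.eq_of_testBit_eq (by
        intro i
        have h2 := h i
        rw [show (Int.negSucc m).testBit i = !m.testBit i from rfl,
            show (Int.negSucc k).testBit i = !k.testBit i from rfl] at h2
        exact Bool.not_inj h2)
      rw [this]

theorem pvZeroLdiff (k : Nat) : Nat.ldiff 0 k = 0 :=
  Nat.eq_of_testBit_eq (by intro i; simp [Nat.testBit_ldiff])

theorem pvLdiffZero (m : Nat) : Nat.ldiff m 0 = m :=
  Nat.eq_of_testBit_eq (by intro i; simp [Nat.testBit_ldiff])

theorem pvLandAddLdiff (m : Nat) : ∀ k, (m &&& k) + Nat.ldiff m k = m := by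
  induction m using Nat.binaryRec with
  | zero => intro k; simp [Nat.zero_and, pvZeroLdiff]
  | bit b m ih =>
    intro k
    induction k using Nat.binaryRec with
    | zero => simp [Nat.and_zero, pvLdiffZero]
    | bit c k _ =>
      rw [Nat.land_bit, Nat.ldiff_bit, Nat.bit_val, Nat.bit_val, Nat.bit_val]
      have := ih k
      cases b <;> cases c <;> simp <;> omega

theorem pvNegSuccNotNonneg (n : Nat) : ¬ (0 : Int) ≤ Int.negSucc n := by
  rw [Int.negSucc_eq]; omega

theorem pvNegSuccFlip (n : Nat) : (-(Int.negSucc n) - 1) = (n : Int) := by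
  rw [Int.negSucc_eq]; ring

theorem pvBandLand (a b : Int) : PySem.Int.band a b = Int.land a b := by
  cases a with
  | ofNat m =>
    cases b with
    | ofNat n =>
      unfold PySem.Int.band
      split_ifs with h1 h2
      · rfl
      · exact absurd (Int.natCast_nonneg n) h2
      · exact absurd (Int.natCast_nonneg m) h1
      · exact absurd (Int.natCast_nonneg m) h1
    | negSucc n =>
      unfold PySem.Int.band
      split_ifs with h1 h2
      · exact absurd h2 (pvNegSuccNotNonneg n)
      · rw [pvNegSuccFlip n, show (Int.ofNat m).toNat = m from rfl, Int.toNat_natCast, Int.land]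
        have := pvLandAddLdiff m n
        omega
      · exact absurd (Int.natCast_nonneg m) h1
      · exact absurd (Int.natCast_nonneg m) h1
  | negSucc m =>
    cases b with
    | ofNat n =>
      unfold PySem.Int.band
      split_ifs with h1 h2
      · exact absurd h1 (pvNegSuccNotNonneg m)
      · exact absurd h1 (pvNegSuccNotNonneg m)
      · rw [pvNegSuccFlip m, show (Int.ofNat n).toNat = n from rfl, Int.toNat_natCast, Int.land]
        have := pvLandAddLdiff n m
        omega
      · exact absurd (Int.natCast_nonneg n) ‹¬ (0:Int) ≤ Int.ofNat n›
    | negSucc n =>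
      unfold PySem.Int.band
      split_ifs with h1 h2
      · exact absurd h1 (pvNegSuccNotNonneg m)
      · exact absurd h1 (pvNegSuccNotNonneg m)
      · exact absurd ‹(0:Int) ≤ Int.negSucc n› (pvNegSuccNotNonneg n)
      · rw [pvNegSuccFlip m, pvNegSuccFlip n, Int.toNat_natCast, Int.toNat_natCast,
          Int.land, Int.negSucc_eq]
        push_cast
        ring

theorem pvBxorXor (a b : Int) : PySem.Int.bxor a b = Int.xor a b := by
  cases a with
  | ofNat m =>
    cases b with
    | ofNat n =>
      unfold PySem.Int.bxor
      split_ifs with h1 h2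
      · rfl
      · exact absurd (Int.natCast_nonneg n) h2
      · exact absurd (Int.natCast_nonneg m) h1
      · exact absurd (Int.natCast_nonneg m) h1
    | negSucc n =>
      unfold PySem.Int.bxor
      split_ifs with h1 h2
      · exact absurd h2 (pvNegSuccNotNonneg n)
      · rw [pvNegSuccFlip n, show (Int.ofNat m).toNat = m from rfl, Int.toNat_natCast,
          Int.xor, Int.negSucc_eq]
        push_cast
        ring
      · exact absurd (Int.natCast_nonneg m) h1
      · exact absurd (Int.natCast_nonneg m) h1
  | negSucc m =>
    cases b with
    | ofNat n =>
      unfold PySem.Int.bxor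
      split_ifs with h1 h2
      · exact absurd h1 (pvNegSuccNotNonneg m)
      · exact absurd h1 (pvNegSuccNotNonneg m)
      · rw [pvNegSuccFlip m, show (Int.ofNat n).toNat = n from rfl, Int.toNat_natCast,
          Int.xor, Int.negSucc_eq]
        push_cast
        ring
      · exact absurd (Int.natCast_nonneg n) ‹¬ (0:Int) ≤ Int.ofNat n›
    | negSucc n =>
      unfold PySem.Int.bxor
      split_ifs with h1 h2
      · exact absurd h1 (pvNegSuccNotNonneg m)
      · exact absurd h1 (pvNegSuccNotNonneg m)
      · exact absurd ‹(0:Int) ≤ Int.negSucc n› (pvNegSuccNotNonneg n)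
      · rw [pvNegSuccFlip m, pvNegSuccFlip n, Int.toNat_natCast, Int.toNat_natCast, Int.xor]

theorem pvTestBit_band (x y : Int) (j : Nat) :
    (PySem.Int.band x y).testBit j = (x.testBit j && y.testBit j) := by
  rw [pvBandLand]; exact Int.testBit_land x y j

theorem pvTestBit_bxor (x y : Int) (j : Nat) :
    (PySem.Int.bxor x y).testBit j = (x.testBit j ^^ y.testBit j) := by
  rw [pvBxorXor]; exact Int.testBit_lxor x y j

theorem pvOneShl (n : Nat) : (1:Int) <<< n = ((2 ^ n : Nat) : Int) := by
  change Int.ofNat (1 <<< n) = _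
  simp [Nat.shiftLeft_eq]

theorem pvTestBit_oneShl (i j : Nat) : ((1:Int) <<< i).testBit j = decide (i = j) := by
  rw [pvOneShl, pvTestBit_natCast]
  exact Nat.testBit_two_pow

theorem pvBandPow_ne_iff (x : Int) (i : Nat) :
    (PySem.Int.band x ((1:Int) <<< i) ≠ 0) ↔ x.testBit i = true := by
  constructor
  · intro hne
    by_contra hb
    apply hne
    apply pvExt; intro j
    rw [pvTestBit_band, pvTestBit_oneShl, pvTestBit_zero]
    by_cases hij : i = j
    · subst hij; simp [Bool.not_eq_true] at hb; simp [hb]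
    · simp [hij]
  · intro h hz
    have h2 := congrArg (fun t : Int => t.testBit i) hz
    simp only [pvTestBit_band, pvTestBit_oneShl, pvTestBit_zero, h] at h2
    simp at h2

theorem pvShrParity (x : Int) (i : Nat) : x.testBit i = decide ((x >>> i) % 2 = 1) := by
  cases x with
  | ofNat m =>
    rw [show (Int.ofNat m) >>> i = ((m >>> i : Nat) : Int) from rfl,
        show (Int.ofNat m).testBit i = m.testBit i from rfl]
    have h1 : m.testBit i = (m >>> i).testBit 0 := by simp [Nat.testBit_shiftRight]
    rw [h1, Nat.testBit_zero, decide_eq_decide]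
    omega
  | negSucc m =>
    rw [show (Int.negSucc m) >>> i = Int.negSucc (m >>> i) from rfl,
        show (Int.negSucc m).testBit i = !m.testBit i from rfl]
    have h1 : m.testBit i = (m >>> i).testBit 0 := by simp [Nat.testBit_shiftRight]
    rw [h1, Nat.testBit_zero]
    set z : Nat := m >>> i with hz
    have e3 : Int.negSucc z = -(z : Int) - 1 := by rw [Int.negSucc_eq]; ring
    rw [e3]
    rcases Nat.mod_two_eq_zero_or_one z with h | h
    · have h2 : (-(z : Int) - 1) % 2 = 1 := by omega
      simp [h, h2]
    · have h2 : ¬ ((-(z : Int) - 1) % 2 = 1) := by omega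
      simp [h, h2]

theorem pvShift_band_one (x : Int) (i : Nat) :
    (PySem.Int.band (x >>> i) 1 ≠ 0) ↔ x.testBit i = true := by
  rw [PySem.Int.band_one, PySem.Int.mod_eq_emod_of_pos (by norm_num), pvShrParity]
  simp only [ne_eq, decide_eq_true_eq]
  omega

theorem pvTestBit_mask (m len j : Nat) :
    ((pvMask m len : Nat) : Int).testBit j = decide (m ≤ j ∧ j < m + len) := by
  rw [pvTestBit_natCast, pvMask, Nat.testBit_shiftLeft, Nat.testBit_two_pow_sub_one]
  by_cases h : m ≤ j
  · rw [decide_eq_true (show j ≥ m from h), Bool.true_and, decide_eq_decide]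
    omega
  · rw [decide_eq_false (show ¬ (j ≥ m) from h), Bool.false_and, eq_comm,
      decide_eq_false_iff_not]
    omega

theorem pvMaskStepTrue (r b : Int) (m len : Nat) (hb : b.testBit m = true) :
    PySem.Int.bxor (PySem.Int.bxor r ((1:Int) <<< m)) (PySem.Int.band b ((pvMask (m+1) len : Nat) : Int))
    = PySem.Int.bxor r (PySem.Int.band b ((pvMask m (len+1) : Nat) : Int)) := by
  apply pvExt; intro j
  rw [pvTestBit_bxor, pvTestBit_bxor, pvTestBit_bxor, pvTestBit_band, pvTestBit_band,
      pvTestBit_oneShl, pvTestBit_mask, pvTestBit_mask]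
  by_cases hj : m = j
  · subst hj
    rw [decide_eq_false (show ¬ (m+1 ≤ m ∧ m < (m+1) + len) from by omega),
        decide_eq_true (show m ≤ m ∧ m < m + (len+1) from by omega),
        decide_eq_true (rfl : m = m)]
    simp [hb]
  · rw [decide_eq_false hj]
    by_cases h5 : m ≤ j ∧ j < m + (len+1)
    · rw [decide_eq_true h5, decide_eq_true (show (m+1) ≤ j ∧ j < (m+1) + len from by omega)]
      simp
    · rw [decide_eq_false h5,
          decide_eq_false (show ¬ ((m+1) ≤ j ∧ j < (m+1) + len) from by omega)]
      simp
  
theorem pvMaskStepFalse (b : Int) (m len : Nat) (hb : b.testBit m = false) :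
    PySem.Int.band b ((pvMask (m+1) len : Nat) : Int)
    = PySem.Int.band b ((pvMask m (len+1) : Nat) : Int) := by
  apply pvExt; intro j
  rw [pvTestBit_band, pvTestBit_band, pvTestBit_mask, pvTestBit_mask]
  by_cases hj : m = j
  · subst hj
    simp [hb]
  · by_cases h5 : m ≤ j ∧ j < m + (len+1)
    · rw [decide_eq_true h5, decide_eq_true (show (m+1) ≤ j ∧ j < (m+1) + len from by omega)]
    · rw [decide_eq_false h5,
          decide_eq_false (show ¬ ((m+1) ≤ j ∧ j < (m+1) + len) from by omega)]

-- ---- counting lemmas ----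
theorem pvCnt_congr (x y : Int) : ∀ (len lo : Nat),
    (∀ j : Nat, lo ≤ j → x.testBit j = y.testBit j) → pvCnt x lo len = pvCnt y lo len := by
  intro len
  induction len with
  | zero => intro lo h; rfl
  | succ len ih =>
    intro lo h
    simp only [pvCnt]
    rw [h lo (le_refl lo), ih (lo+1) (fun j hj => h j (by omega))]

theorem pvCountA (r : Int) : ∀ (len m_ : Nat) (s : Int),
    (PySem.List.pyRange (m_ : Int) ((m_ : Int) + (len : Int)) 1).foldl
      (fun s j => if PySem.Int.band r ((1:Int) <<< j.toNat) ≠ 0 then s + 1 else s) s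
    = s + ((pvCnt r m_ len : Nat) : Int) := by
  intro len
  induction len with
  | zero =>
    intro m_ s
    rw [PySem.List.pyRange_one_eq_nil (by push_cast; omega)]
    simp [pvCnt]
  | succ len ih =>
    intro m_ s
    rw [PySem.List.pyRange_one_cons (by push_cast; omega), List.foldl_cons]
    have hrange : ((m_ : Int) + 1) = ((m_ + 1 : Nat) : Int) := by push_cast; ring
    have hrange2 : ((m_ : Int) + ((len + 1 : Nat) : Int)) = ((m_ + 1 : Nat) : Int) + (len : Int) := by
      push_cast; ring
    rw [hrange2, hrange]
    by_cases hr : r.testBit m_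
    · rw [if_pos (by rw [Int.toNat_natCast, Int.shiftLeft_natCast_right]; exact (pvBandPow_ne_iff r m_).mpr hr)]
      rw [ih (m_ + 1) (s + 1)]
      simp only [pvCnt, hr, if_pos]
      push_cast
      ring
    · rw [if_neg (by rw [Int.toNat_natCast, Int.shiftLeft_natCast_right]; exact fun hc => hr ((pvBandPow_ne_iff r m_).mp hc))]
      rw [ih (m_ + 1) s]
      simp only [pvCnt, hr, if_neg]
      push_cast
      ring

-- ---- parity lemmas ----
theorem pvSgn_add (x y : Nat) : pvSgn (x + y) = pvSgn x * pvSgn y := by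
  have h : (x + y) % 2 = (x % 2 + y % 2) % 2 := Nat.add_mod x y 2
  unfold pvSgn
  rcases Nat.mod_two_eq_zero_or_one x with hx | hx <;>
    rcases Nat.mod_two_eq_zero_or_one y with hy | hy <;>
      rw [hx, hy] at h <;> norm_num at h ⊢ <;> simp [hx, hy, h]

theorem pvXorMod (x y : Nat) : (x % 2) ^^^ (y % 2) = (x + y) % 2 := by
  rcases Nat.mod_two_eq_zero_or_one x with hx | hx <;>
    rcases Nat.mod_two_eq_zero_or_one y with hy | hy <;>
      rw [hx, hy] <;> norm_num <;> omega

theorem pvXorOne (x : Nat) : (x % 2) ^^^ 1 = (x + 1) % 2 := by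
  rcases Nat.mod_two_eq_zero_or_one x with h | h <;> rw [h] <;> norm_num <;> omega

theorem pvCastOne : (1 : Int) = ((1 : Nat) : Int) := rfl

-- ---- the B-side run ----
theorem pvB_run (a b p : Int) (N : Nat) : ∀ (len m : Nat), m + len = N →
    (PySem.List.pyRange ((N : Int) - 1) ((m : Int) - 1) (-1)).foldl (blade_step_alt a b p) (0, 0)
    = (((pvSum a b p N m len % 2 : Nat) : Int), ((pvCnt a m len : Nat) : Int)) := by
  intro len
  induction len with
  | zero =>
    intro m hm
    rw [PySem.List.pyRange_neg_one_eq_nil (by omega)]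
    simp [pvSum, pvCnt]
  | succ len ih =>
    intro m hm
    have hmN : (m : Int) < (N : Int) := by exact_mod_cast (by omega : m < N)
    have h1 : ((m:Int) - 1 + 1) = (m:Int) := by ring
    have h2 : ((N:Int) - 1 + 1) = (N:Int) := by ring
    have hsplit : PySem.List.pyRange ((N:Int)-1) ((m:Int)-1) (-1)
        = PySem.List.pyRange ((N:Int)-1) (m:Int) (-1) ++ [(m:Int)] := by
      rw [PySem.List.pyRange_neg_one_eq_reverse ((N:Int)-1) ((m:Int)-1),
          PySem.List.pyRange_neg_one_eq_reverse ((N:Int)-1) (m:Int), h1, h2,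
          PySem.List.pyRange_one_cons hmN, List.reverse_cons]
    have hIH := ih (m+1) (by omega)
    rw [show (((m+1:Nat)):Int) - 1 = (m:Int) from by push_cast; ring] at hIH
    rw [hsplit, List.foldl_append, hIH]
    simp only [List.foldl_cons, List.foldl_nil]
    unfold blade_step_alt
    simp only [Int.toNat_natCast]
    have hlen : N - (m+1) = len := by omega
    have hsum : pvSum a b p N m (len+1) = pvTrm a b p N m + pvSum a b p N (m+1) len := rfl
    by_cases hb : b.testBit m
    · rw [if_pos ((pvShift_band_one b m).mpr hb)]
      by_cases ha : a.testBit m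
      · by_cases hp : p ≤ (m : Int)
        · rw [if_pos ⟨(pvShift_band_one a m).mpr ha, hp⟩,
              if_pos ((pvShift_band_one a m).mpr ha)]
          refine congrArg₂ Prod.mk ?_ ?_
          · rw [pvCastOne, PySem.Int.band_natCast, Nat.and_one_is_mod,
                PySem.Int.bxor_natCast, pvXorMod, PySem.Int.bxor_natCast, pvXorOne]
            have htrm : pvTrm a b p N m = pvCnt a (m+1) len + 1 := by
              simp [pvTrm, hb, ha, hp, hlen]
            exact Nat.cast_inj.mpr (by rw [hsum, htrm]; omega)
          · simp only [pvCnt, ha, if_pos]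
            push_cast
            ring
        · rw [if_neg (fun hc => hp hc.2), if_pos ((pvShift_band_one a m).mpr ha)]
          refine congrArg₂ Prod.mk ?_ ?_
          · rw [pvCastOne, PySem.Int.band_natCast, Nat.and_one_is_mod,
                PySem.Int.bxor_natCast, pvXorMod]
            have htrm : pvTrm a b p N m = pvCnt a (m+1) len := by
              simp [pvTrm, hb, ha, hp, hlen]
            exact Nat.cast_inj.mpr (by rw [hsum, htrm]; omega)
          · simp only [pvCnt, ha, if_pos]
            push_cast
            ring
      · rw [if_neg (fun hc => ha ((pvShift_band_one a m).mp hc.1)),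
            if_neg (fun hc => ha ((pvShift_band_one a m).mp hc))]
        refine congrArg₂ Prod.mk ?_ ?_
        · rw [pvCastOne, PySem.Int.band_natCast, Nat.and_one_is_mod,
              PySem.Int.bxor_natCast, pvXorMod]
          have htrm : pvTrm a b p N m = pvCnt a (m+1) len := by
            simp [pvTrm, hb, ha, hlen]
          exact Nat.cast_inj.mpr (by rw [hsum, htrm]; omega)
        · simp [pvCnt, ha]
    · rw [if_neg (fun hc => hb ((pvShift_band_one b m).mp hc))]
      have htrm : pvTrm a b p N m = 0 := by simp [pvTrm, hb]
      by_cases ha : a.testBit m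
      · rw [if_pos ((pvShift_band_one a m).mpr ha)]
        refine congrArg₂ Prod.mk ?_ ?_
        · exact Nat.cast_inj.mpr (by rw [hsum, htrm]; omega)
        · simp only [pvCnt, ha, if_pos]
          push_cast
          ring
      · rw [if_neg (fun hc => ha ((pvShift_band_one a m).mp hc))]
        refine congrArg₂ Prod.mk ?_ ?_
        · exact Nat.cast_inj.mpr (by rw [hsum, htrm]; omega)
        · simp [pvCnt, ha]

-- ---- the A-side run ----
theorem pvA_run (a b p q : Int) (N : Nat) (hN : p + q = (N : Int)) : ∀ (len m : Nat), m + len = N →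
    ∀ (sign r : Int), (∀ j : Nat, m ≤ j → r.testBit j = a.testBit j) →
    (PySem.List.pyRange (m : Int) (p + q) 1).foldl (blade_step b p q) (sign, r)
    = (sign * pvSgn (pvSum a b p N m len),
       PySem.Int.bxor r (PySem.Int.band b ((pvMask m len : Nat) : Int))) := by
  intro len
  induction len with
  | zero =>
    intro m hm sign r hr
    rw [hN, PySem.List.pyRange_one_eq_nil (by exact_mod_cast (by omega : N ≤ m))]
    simp [pvSum, pvSgn, pvMask, Nat.zero_shiftLeft]
  | succ len ih =>
    intro m hm sign r hr
    have hmN : (m:Int) < p + q := by rw [hN]; exact_mod_cast (by omega : m < N)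
    have hcast1 : ((m:Int) + 1) = ((m+1 : Nat) : Int) := by push_cast; ring
    rw [PySem.List.pyRange_one_cons hmN, List.foldl_cons, hcast1]
    have hrm : r.testBit m = a.testBit m := hr m (le_refl m)
    have hinv' : ∀ j : Nat, m+1 ≤ j → r.testBit j = a.testBit j := fun j hj => hr j (by omega)
    have hlen : N - (m+1) = len := by omega
    have hsum : pvSum a b p N m (len+1) = pvTrm a b p N m + pvSum a b p N (m+1) len := rfl
    by_cases hb : b.testBit m
    · have hcond : ¬ (PySem.Int.band b ((1:Int) <<< ((m:Int)).toNat) = 0) := by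
        rw [Int.toNat_natCast]
        exact (pvBandPow_ne_iff b m).mpr hb
      have hswaps : (PySem.List.pyRange ((m:Int) + 1) (p + q) 1).foldl
          (fun s j => if PySem.Int.band r ((1:Int) <<< j.toNat) ≠ 0 then s + 1 else s) 0
          = ((pvCnt a (m+1) len : Nat) : Int) := by
        rw [hcast1, show p + q = ((m+1:Nat):Int) + ((len:Nat):Int) from by rw [hN]; push_cast; omega]
        rw [pvCountA r len (m+1) 0, zero_add, pvCnt_congr r a len (m+1) hinv']
      have hmod : (PySem.Int.mod ((pvCnt a (m+1) len : Nat) : Int) 2 = 1)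
          ↔ (pvCnt a (m+1) len % 2 = 1) := by
        rw [show (2:Int) = ((2:Nat):Int) from rfl, PySem.Int.mod_natCast]
        exact_mod_cast Iff.rfl
      have hsgnif : (if PySem.Int.mod ((pvCnt a (m+1) len : Nat) : Int) 2 = 1 then sign * -1 else sign)
          = sign * pvSgn (pvCnt a (m+1) len) := by
        unfold pvSgn
        by_cases hc : pvCnt a (m+1) len % 2 = 1
        · rw [if_pos (hmod.mpr hc), if_pos hc]
        · rw [if_neg (fun hx => hc (hmod.mp hx)), if_neg hc, mul_one]
      have hstep : blade_step b p q (sign, r) (m:Int)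
          = ((sign * pvSgn (pvCnt a (m+1) len)) * (if a.testBit m then metric_sign_py (m:Int) p q else 1),
             PySem.Int.bxor r ((1:Int) <<< ((m:Int)).toNat)) := by
        unfold blade_step
        rw [if_neg hcond]
        dsimp only
        rw [hswaps, hsgnif]
        by_cases ha : a.testBit m
        · have hrtrue : PySem.Int.band r ((1:Int) <<< ((m:Int)).toNat) ≠ 0 := by
            rw [Int.toNat_natCast]
            exact (pvBandPow_ne_iff r m).mpr (hrm.trans ha)
          rw [if_pos hrtrue, if_pos ha]
        · have hrfalse : ¬ (PySem.Int.band r ((1:Int) <<< ((m:Int)).toNat) ≠ 0) := by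
            rw [Int.toNat_natCast]
            intro hc
            exact ha (hrm.symm.trans ((pvBandPow_ne_iff r m).mp hc))
          rw [if_neg hrfalse, if_neg ha, mul_one]
      rw [hstep]
      have hinv2 : ∀ j : Nat, m+1 ≤ j →
          (PySem.Int.bxor r ((1:Int) <<< ((m:Int)).toNat)).testBit j = a.testBit j := by
        intro j hj
        rw [Int.toNat_natCast, pvTestBit_bxor, pvTestBit_oneShl]
        have hne : ¬ (m = j) := by omega
        simp [hne, hinv' j hj]
      rw [ih (m+1) (by omega) _ _ hinv2]
      refine congrArg₂ Prod.mk ?_ ?_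
      · rw [hsum, pvSgn_add]
        by_cases ha : a.testBit m
        · by_cases hp' : p ≤ (m:Int)
          · rw [if_pos ha,
              show pvTrm a b p N m = pvCnt a (m+1) len + 1 from by simp [pvTrm, hb, ha, hp', hlen],
              pvSgn_add,
              show pvSgn 1 = -1 from rfl,
              show metric_sign_py (m:Int) p q = -1 from by
                unfold metric_sign_py; rw [if_neg (not_lt.mpr hp')]]
            ring
          · rw [if_pos ha,
              show pvTrm a b p N m = pvCnt a (m+1) len from by simp [pvTrm, hb, ha, hp', hlen],
              show metric_sign_py (m:Int) p q = 1 from by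
                unfold metric_sign_py; rw [if_pos (not_le.mp hp')]]
            ring
        · rw [if_neg ha,
            show pvTrm a b p N m = pvCnt a (m+1) len from by
              simp [pvTrm, hb, eq_false_of_ne_true ha, hlen]]
          ring
      · rw [Int.toNat_natCast]
        exact pvMaskStepTrue r b m len hb
    · have hb' : b.testBit m = false := eq_false_of_ne_true hb
      have hcond0 : PySem.Int.band b ((1:Int) <<< ((m:Int)).toNat) = 0 := by
        rw [Int.toNat_natCast]
        by_contra hne
        exact hb ((pvBandPow_ne_iff b m).mp hne)
      have hstep : blade_step b p q (sign, r) (m:Int) = (sign, r) := by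
        unfold blade_step
        rw [if_pos hcond0]
      rw [hstep, ih (m+1) (by omega) sign r hinv']
      refine congrArg₂ Prod.mk ?_ ?_
      · rw [hsum, show pvTrm a b p N m = 0 from by simp [pvTrm, hb'], zero_add]
      · exact congrArg _ (pvMaskStepFalse b m len hb')

-- ===== VERDICT (by name: the statement is the Claim_ definition above) =====
theorem pvCastModTwo_ne_zero (S : Nat) : (((S % 2 : Nat) : Int) ≠ 0) ↔ S % 2 = 1 := by
  constructor
  · intro h
    have : ¬ (S % 2 = 0) := fun h0 => h (by rw [h0]; rfl)
    omega
  · intro h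
    rw [h]
    norm_num

theorem blade_product_py_spec : Claim_equal_blade_product_py := by
  unfold Claim_equal_blade_product_py
  intro a b p q _hdom
  unfold Spec_blade_product_py blade_product_py blade_product_py_alt
  dsimp only
  by_cases hn : 0 < p + q
  · have hN : p + q = (((p+q).toNat : Nat) : Int) := by omega
    set N : Nat := (p+q).toNat with hNdef
    have hA := pvA_run a b p q N hN N 0 (by omega) 1 a (fun j _ => rfl)
    rw [show ((0:Nat):Int) = (0:Int) from rfl] at hA
    have hB := pvB_run a b p N N 0 (by omega)
    rw [show ((0:Nat):Int) - 1 = (-1:Int) from by norm_num] at hB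
    rw [hA, if_pos hn]
    rw [show p + q - 1 = (N:Int) - 1 from by omega]
    rw [hB]
    dsimp only
    refine congrArg₂ Prod.mk ?_ ?_
    · rw [one_mul]
      unfold pvSgn
      by_cases hs : pvSum a b p N 0 N % 2 = 1
      · rw [if_pos ((pvCastModTwo_ne_zero _).mpr hs), if_pos hs]
      · rw [if_neg (fun hx => hs ((pvCastModTwo_ne_zero _).mp hx)), if_neg hs]
    · refine congrArg _ (congrArg _ ?_)
      rw [pvOneShl, pvMask, Nat.shiftLeft_zero]
      have h1 : 1 ≤ 2 ^ N := Nat.one_le_two_pow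
      push_cast [h1]
      ring
  · rw [PySem.List.pyRange_one_eq_nil (by omega), if_neg hn,
      PySem.List.pyRange_neg_one_eq_nil (by omega)]
    simp
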